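-- pv_equiv track=rewrite | github.com/SimreAniri/algorithms-and-data-structures | Lesson_4_Task_1.py | div_count_dict
-- ===== SOURCE A (Python) =====
-- MIN_DIV = 2
--
-- MAX_DIV = 9
--
-- def div_count_dict(max_number):
--     div_dict = dict()
--
--     for div in range(MIN_DIV, MAX_DIV + 1):
--         div_dict[div] = 0
--
--         for num in range(2, max_number + 1):
--
--             if num % div == 0:
--                 div_dict[div] += 1
--
--     return div_dict
-- ===== SOURCE B (Python) =====
-- MIN_DIV = 2
--
-- MAX_DIV = 9
--
-- def div_count_dict(max_number):
--     # closed form: multiples of div in [2, max_number] are exactly max_number // div (clamped at 0)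
--     return {div: max(0, max_number // div) for div in range(MIN_DIV, MAX_DIV + 1)}
-- ===== Notes on version B (the rewrite author's own statement) =====
-- stated objective: faster
-- what changed: Replaces the O(max_number) inner scan per divisor with the closed form max(0, max_number // div) for each divisor 2..9.
import Mathlib
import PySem

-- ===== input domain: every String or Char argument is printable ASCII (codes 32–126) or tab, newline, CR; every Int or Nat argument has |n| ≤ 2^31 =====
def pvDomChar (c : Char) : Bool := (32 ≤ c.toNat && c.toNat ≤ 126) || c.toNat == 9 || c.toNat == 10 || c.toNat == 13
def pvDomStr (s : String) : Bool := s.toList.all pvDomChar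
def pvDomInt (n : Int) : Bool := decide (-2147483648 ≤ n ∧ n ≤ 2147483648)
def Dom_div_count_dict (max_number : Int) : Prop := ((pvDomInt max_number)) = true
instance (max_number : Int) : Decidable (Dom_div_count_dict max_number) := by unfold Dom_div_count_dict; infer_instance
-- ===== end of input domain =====

-- B replaces A's per-divisor scan of 2..max_number with the closed form max(0, max_number // div) (faster).

-- ===== PORT A =====
def div_count_dict (max_number : Int) : List (Int × Int) :=
  ((PySem.List.pyRange 2 (9 + 1) 1).foldl (fun d div =>
      (PySem.List.pyRange 2 (max_number + 1) 1).foldl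
        (fun d' num =>
          if PySem.Int.mod num div == 0 then d'.insert div (d'.getD div 0 + 1) else d')
        (d.insert div 0))
    PySem.Dict.empty).items

-- ===== PORT B =====
def div_count_dict_alt (max_number : Int) : List (Int × Int) :=
  (PySem.List.pyRange 2 (9 + 1) 1).map
    (fun div => (div, max 0 (PySem.Int.floordiv max_number div)))

-- ===== PRECONDITION & SPEC =====
def Spec_div_count_dict (max_number : Int) (out : List (Int × Int)) : Prop := out = div_count_dict_alt max_number
instance (max_number : Int) (out : List (Int × Int)) : Decidable (Spec_div_count_dict max_number out) := by unfold Spec_div_count_dict; infer_instance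

-- ===== CLAIM (what is proved, stated in full; the proofs are below) =====
def Claim_equal_div_count_dict : Prop := ∀ (max_number : Int), Dom_div_count_dict max_number → Spec_div_count_dict max_number (div_count_dict max_number)

-- ===== LEMMAS AND PROOFS =====

-- inner loop: only key `div` is touched; starting from `d.insert div c` it adds the count of multiples
theorem inner_fold (L : List Int) (div : Int) (d : PySem.Dict Int Int) (c : Int) :
    L.foldl (fun d' num =>
        if PySem.Int.mod num div == 0 then d'.insert div (d'.getD div 0 + 1) else d')
      (d.insert div c)
    = d.insert div (c + (L.countP (fun num => PySem.Int.mod num div == 0) : Int)) := by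
  induction L generalizing c with
  | nil => simp
  | cons x L ih =>
    simp only [List.foldl_cons, List.countP_cons]
    by_cases hx : (PySem.Int.mod x div == 0) = true
    · rw [if_pos hx, PySem.Dict.getD_insert_self, PySem.Dict.insert_insert_self, ih]
      congr 1
      simp only [hx, if_pos]
      push_cast
      ring
    · rw [if_neg hx, ih]
      congr 1
      simp [hx]

-- counting multiples of div among 2..n equals n / div (Nat), for div ≥ 2
theorem count_multiples (div : Nat) (hd : 2 ≤ div) (n : Nat) :
    (PySem.List.pyRange 2 ((n : Int) + 1) 1).countP
        (fun num => PySem.Int.mod num (div : Int) == 0)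
      = n / div := by
  induction n with
  | zero =>
    rw [PySem.List.pyRange_one_eq_nil (by norm_num)]
    simp
  | succ n ih =>
    by_cases hn : n = 0
    · subst hn
      rw [PySem.List.pyRange_one_eq_nil (by norm_num)]
      simp [Nat.div_eq_of_lt (show 1 < div by omega)]
    · push_cast
      rw [PySem.List.pyRange_one_succ_right (by omega : (2 : Int) ≤ (n : Int) + 1)]
      rw [List.countP_append]
      push_cast at ih
      rw [ih, List.countP_singleton]
      rw [Nat.succ_div]
      have : PySem.Int.mod ((n : Int) + 1) (div : Int) = 0 ↔ div ∣ (n + 1) := by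
        rw [PySem.Int.mod_eq_zero_iff_dvd]
        exact_mod_cast Int.natCast_dvd_natCast.symm
      by_cases h : div ∣ (n + 1)
      · simp [this.mpr h, h]
      · have : ¬ PySem.Int.mod ((n : Int) + 1) (div : Int) = 0 := fun hc => h (this.mp hc)
        simp [this, h]

-- closed form for the inner count: max 0 (m // div), any m, div ≥ 2
theorem count_eq_closed (div : Nat) (hd : 2 ≤ div) (m : Int) :
    ((PySem.List.pyRange 2 (m + 1) 1).countP
        (fun num => PySem.Int.mod num (div : Int) == 0) : Int)
      = max 0 (PySem.Int.floordiv m (div : Int)) := by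
  by_cases hm : 0 ≤ m
  · obtain ⟨n, rfl⟩ : ∃ n : Nat, m = (n : Int) := ⟨m.toNat, (Int.toNat_of_nonneg hm).symm⟩
    rw [count_multiples div hd n, PySem.Int.floordiv_natCast]
    have : (0 : Int) ≤ ((n / div : Nat) : Int) := Int.natCast_nonneg _
    omega
  · have h1 : PySem.List.pyRange 2 (m + 1) 1 = [] :=
      PySem.List.pyRange_one_eq_nil (by omega)
    have h2 : PySem.Int.floordiv m (div : Int) < 0 := by
      rw [PySem.Int.floordiv_lt_iff_lt_mul (by exact_mod_cast (by omega : 0 < div))]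
      omega
    simp [h1]
    omega

-- the eight fresh-key inserts of the outer loop, as an items list (keys 2..9 distinct literals)
theorem items_chain (a b c d e f g h : Int) :
    ((((((((PySem.Dict.empty.insert 2 a).insert 3 b).insert 4 c).insert 5 d).insert 6 e).insert
          7 f).insert 8 g).insert 9 h : PySem.Dict Int Int).items
      = [(2, a), (3, b), (4, c), (5, d), (6, e), (7, f), (8, g), (9, h)] := rfl

-- ===== VERDICT (by name: the statement is the Claim_ definition above) =====
theorem div_count_dict_spec : Claim_equal_div_count_dict := by
  intro m _
  show div_count_dict m = div_count_dict_alt m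
  unfold div_count_dict div_count_dict_alt
  rw [show PySem.List.pyRange 2 (9 + 1) 1 = [2, 3, 4, 5, 6, 7, 8, 9] from by decide]
  simp only [List.foldl_cons, List.foldl_nil, List.map_cons, List.map_nil]
  rw [inner_fold, inner_fold, inner_fold, inner_fold, inner_fold, inner_fold, inner_fold,
    inner_fold, items_chain]
  simp only [zero_add]
  have h2 := count_eq_closed 2 (by omega) m
  have h3 := count_eq_closed 3 (by omega) m
  have h4 := count_eq_closed 4 (by omega) m
  have h5 := count_eq_closed 5 (by omega) m
  have h6 := count_eq_closed 6 (by omega) m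
  have h7 := count_eq_closed 7 (by omega) m
  have h8 := count_eq_closed 8 (by omega) m
  have h9 := count_eq_closed 9 (by omega) m
  push_cast at h2 h3 h4 h5 h6 h7 h8 h9
  rw [h2, h3, h4, h5, h6, h7, h8, h9]
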